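-- pv_equiv track=rewrite | github.com/threes-was-taken/advent-of-python-code | solutions/year_2015/day_08.py | count_memory_chars
-- ===== SOURCE A (Python) =====
-- def count_memory_chars(line: str) -> int:
--     r"""
--     Count actual memory characters in a string literal.
--
--     Handles escape sequences: \\, \", and \xNN (hex ASCII codes).
--
--     Args:
--         line: String literal without surrounding quotes
--
--     Returns:
--         Number of characters in memory representation
--     """
--     i = 0
--     memory_chars = 0
--     while i < len(line):
--         if line[i] == "\\" and i + 1 < len(line):  # Add bounds check
--             if line[i + 1] in ["\\", '"']:
--                 memory_chars += 1
--                 i += 2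
--             elif line[i + 1] == "x" and i + 3 < len(line):  # Add bounds check
--                 memory_chars += 1
--                 i += 4
--             else:
--                 # Handle malformed escape sequences
--                 memory_chars += 1
--                 i += 1
--         else:
--             memory_chars += 1
--             i += 1
--     return memory_chars
-- ===== SOURCE B (Python) =====
-- import re
--
-- _TOKEN = re.compile(r'\\\\|\\"|\\x..|.', re.DOTALL)
--
--
-- def count_memory_chars(line: str) -> int:
--     return len(_TOKEN.findall(line))
-- ===== Notes on version B (the rewrite author's own statement) =====
-- stated objective: idiomatic
-- what changed: Replaces A's hand-written index/branch while-loop by a single regex tokenization: re.findall(r'\\\\|\\"|\\x..|.', line, re.DOTALL) matches one token per in-memory character and B returns the number of matches.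
import Mathlib
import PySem

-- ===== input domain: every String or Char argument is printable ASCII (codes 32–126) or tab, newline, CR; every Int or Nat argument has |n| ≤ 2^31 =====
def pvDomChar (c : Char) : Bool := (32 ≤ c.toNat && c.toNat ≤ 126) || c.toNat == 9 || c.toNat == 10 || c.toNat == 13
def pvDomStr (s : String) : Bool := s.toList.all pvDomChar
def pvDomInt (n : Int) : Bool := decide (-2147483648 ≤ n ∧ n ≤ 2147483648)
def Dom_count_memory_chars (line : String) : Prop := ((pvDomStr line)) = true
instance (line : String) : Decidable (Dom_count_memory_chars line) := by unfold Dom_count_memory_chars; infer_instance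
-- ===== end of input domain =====

-- B replaces A's hand-written index/branch loop by a single regex tokenization
-- (re.findall of '\\\\|\\"|\\x..|.' with DOTALL) and counts the tokens; equal return value, no speed claim.

-- ===== PORT A =====
-- A's while loop over index i, ported as recursion on the remaining characters
-- (the pair (i, memory_chars) becomes the suffix and the returned count); the
-- outer split on ≥4 remaining characters is A's "i + 3 < len(line)" bounds check.
def countA : List Char → Int
  | c :: c2 :: a :: b :: rest =>
      if c = '\\' then                       -- line[i] == "\\" and i+1 < len(line)
        if c2 = '\\' ∨ c2 = '"' then 1 + countA (a :: b :: rest)   -- i += 2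
        else if c2 = 'x' then 1 + countA rest                        -- i += 4
        else 1 + countA (c2 :: a :: b :: rest)                       -- malformed: i += 1
      else 1 + countA (c2 :: a :: b :: rest)                         -- ordinary: i += 1
  | c :: c2 :: rest =>                        -- fewer than 4 chars left: \x bounds check fails
      if c = '\\' then
        if c2 = '\\' ∨ c2 = '"' then 1 + countA rest
        else 1 + countA (c2 :: rest)
      else 1 + countA (c2 :: rest)
  | [_] => 1
  | [] => 0
termination_by l => l.length
decreasing_by all_goals (simp; try omega)

def count_memory_chars (line : String) : Int := countA line.toList

-- ===== PORT B =====
-- re.findall scans left to right, trying the alternatives \\\\, \", \x.. (DOTALL), . in order;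
-- ported as a tokenizer producing the list of matched tokens, then counting them.
def tokenizeB : List Char → List (List Char)
  | '\\' :: '\\' :: rest => ['\\', '\\'] :: tokenizeB rest
  | '\\' :: '"' :: rest => ['\\', '"'] :: tokenizeB rest
  | '\\' :: 'x' :: a :: b :: rest => ['\\', 'x', a, b] :: tokenizeB rest
  | c :: rest => [c] :: tokenizeB rest
  | [] => []
termination_by l => l.length

def count_memory_chars_alt (line : String) : Int := (tokenizeB line.toList).length

-- ===== PRECONDITION & SPEC =====
def Spec_count_memory_chars (line : String) (out : Int) : Prop := out = count_memory_chars_alt line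
instance (line : String) (out : Int) : Decidable (Spec_count_memory_chars line out) := by unfold Spec_count_memory_chars; infer_instance

-- ===== CLAIM (what is proved, stated in full; the proofs are below) =====
def Claim_equal_count_memory_chars : Prop := ∀ (line : String), Dom_count_memory_chars line → Spec_count_memory_chars line (count_memory_chars line)

-- ===== LEMMAS AND PROOFS =====
theorem countA_eq_tokens (l : List Char) : countA l = ((tokenizeB l).length : Int) := by
  fun_induction countA l with
  | case1 c2 a b rest h ih => rcases h with h | h <;> subst h <;> simp [tokenizeB, ih] <;> omega
  | case2 a b rest h ih => simp [tokenizeB, ih] <;> omega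
  | case3 c2 a b rest h hx ih =>
      simp only [not_or] at h
      rw [tokenizeB.eq_def]; split <;> simp_all <;> omega
  | case4 c c2 a b rest hc ih =>
      rw [tokenizeB.eq_def]; split <;> simp_all <;> omega
  | case5 c2 rest hshape h ih => rcases h with h | h <;> subst h <;> simp [tokenizeB, ih] <;> omega
  | case6 c2 rest hshape h ih =>
      simp only [not_or] at h
      rw [tokenizeB.eq_def]; split <;> simp_all <;> omega
  | case7 c c2 rest hshape hc ih =>
      rw [tokenizeB.eq_def]; split <;> simp_all <;> omega
  | case8 c => simp [tokenizeB]
  | case9 => simp [tokenizeB]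

-- ===== VERDICT (by name: the statement is the Claim_ definition above) =====
theorem count_memory_chars_spec : Claim_equal_count_memory_chars := by
  intro line _
  unfold Spec_count_memory_chars count_memory_chars count_memory_chars_alt
  exact countA_eq_tokens line.toList
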